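-- pv_equiv track=rewrite | github.com/djFatNerd/CityCraft | urban_planning/utils/initialize_plan.py | get_buildings_boxes
-- ===== SOURCE A (Python) =====
-- def get_buildings_boxes(buildings, img_size=768):
--     building_boxes = []
--     for building in buildings:
--         x_min = min(building, key=lambda x: x[0])[0]
--         x_max = max(building, key=lambda x: x[0])[0]
--         y_min = min(building, key=lambda x: x[1])[1]
--         y_max = max(building, key=lambda x: x[1])[1]
--
--         building_box = (x_min, y_min, x_max - x_min, y_max - y_min)
--         building_boxes.append(building_box)
--
--     return building_boxes
-- ===== SOURCE B (Python) =====
-- def get_buildings_boxes(buildings, img_size=768):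
--     boxes = []
--     for building in buildings:
--         x_min, y_min = building[0]
--         x_max, y_max = x_min, y_min
--         for x, y in building[1:]:
--             x_min = min(x_min, x)
--             x_max = max(x_max, x)
--             y_min = min(y_min, y)
--             y_max = max(y_max, y)
--         boxes.append((x_min, y_min, x_max - x_min, y_max - y_min))
--     return boxes
-- ===== Notes on version B (the rewrite author's own statement) =====
-- stated objective: alternative
-- what changed: Each building's four separate keyed min/max scans are replaced by one single pass that maintains (x_min, x_max, y_min, y_max) together in an accumulator seeded from the first point.
import Mathlib
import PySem

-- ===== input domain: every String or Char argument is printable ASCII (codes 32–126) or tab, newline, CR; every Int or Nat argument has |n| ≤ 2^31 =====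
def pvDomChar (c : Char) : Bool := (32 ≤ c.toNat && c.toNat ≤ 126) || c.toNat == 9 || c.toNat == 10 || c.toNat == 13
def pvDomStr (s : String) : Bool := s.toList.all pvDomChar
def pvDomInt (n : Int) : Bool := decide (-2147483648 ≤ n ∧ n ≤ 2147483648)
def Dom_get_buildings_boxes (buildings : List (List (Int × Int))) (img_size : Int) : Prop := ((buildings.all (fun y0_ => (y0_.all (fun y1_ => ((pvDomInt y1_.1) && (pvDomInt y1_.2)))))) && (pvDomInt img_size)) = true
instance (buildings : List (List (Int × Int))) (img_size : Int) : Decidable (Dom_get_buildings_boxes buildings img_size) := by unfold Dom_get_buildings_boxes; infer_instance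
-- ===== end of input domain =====

-- B replaces A's four keyed min/max passes per building by one single-pass accumulator of the
-- four extremes, seeded from the first point (objective: alternative single-pass decomposition).
-- Both A and B raise on an empty building (ValueError / IndexError): those inputs are outside Pre_.

-- ===== PORT A =====
-- min(building, key=lambda x: x[0])[0] etc.; on an empty building Python raises (excluded by Pre_),
-- the port's .getD 0 there is an arbitrary total-ization.
def pvBoxA (b : List (Int × Int)) : Int × Int × Int × Int :=
  let x_min := ((PySem.List.min? b (fun x => x.1)).map (fun x => x.1)).getD 0
  let x_max := ((PySem.List.max? b (fun x => x.1)).map (fun x => x.1)).getD 0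
  let y_min := ((PySem.List.min? b (fun x => x.2)).map (fun x => x.2)).getD 0
  let y_max := ((PySem.List.max? b (fun x => x.2)).map (fun x => x.2)).getD 0
  (x_min, y_min, x_max - x_min, y_max - y_min)

def get_buildings_boxes (buildings : List (List (Int × Int))) (img_size : Int) : List (Int × Int × Int × Int) :=
  buildings.foldl (fun building_boxes building => building_boxes ++ [pvBoxA building]) []

-- ===== PORT B =====
-- single pass: state (x_min, x_max, y_min, y_max) seeded from building[0], folded over building[1:]
def pvBoxB (p : Int × Int) (t : List (Int × Int)) : Int × Int × Int × Int :=
  let s := t.foldl (fun s q => (min s.1 q.1, max s.2.1 q.1, min s.2.2.1 q.2, max s.2.2.2 q.2))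
             (p.1, p.1, p.2, p.2)
  (s.1, s.2.2.1, s.2.1 - s.1, s.2.2.2 - s.2.2.1)

def get_buildings_boxes_alt (buildings : List (List (Int × Int))) (img_size : Int) : List (Int × Int × Int × Int) :=
  buildings.map (fun b => match b with
    | [] => (0, 0, 0, 0)   -- Python B raises here (excluded by Pre_); arbitrary total-ization
    | p :: t => pvBoxB p t)

-- ===== PRECONDITION & SPEC =====
-- Pre_ excludes inputs containing an empty building, on which A raises ValueError (min of empty).
def Pre_get_buildings_boxes (buildings : List (List (Int × Int))) (img_size : Int) : Prop :=
  ∀ b ∈ buildings, b ≠ []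
instance (buildings : List (List (Int × Int))) (img_size : Int) : Decidable (Pre_get_buildings_boxes buildings img_size) := by unfold Pre_get_buildings_boxes; infer_instance
def pvWitness_get_buildings_boxes : (List (List (Int × Int))) × Int := ([[(1, 2), (3, 0)], [(5, 5)]], 768)

def Spec_get_buildings_boxes (buildings : List (List (Int × Int))) (img_size : Int) (out : List (Int × Int × Int × Int)) : Prop := out = get_buildings_boxes_alt buildings img_size
instance (buildings : List (List (Int × Int))) (img_size : Int) (out : List (Int × Int × Int × Int)) : Decidable (Spec_get_buildings_boxes buildings img_size out) := by unfold Spec_get_buildings_boxes; infer_instance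

-- ===== CLAIM (what is proved, stated in full; the proofs are below) =====
def Claim_equal_get_buildings_boxes : Prop := ∀ (buildings : List (List (Int × Int))) (img_size : Int), Dom_get_buildings_boxes buildings img_size → Pre_get_buildings_boxes buildings img_size → Spec_get_buildings_boxes buildings img_size (get_buildings_boxes buildings img_size)

-- ===== LEMMAS AND PROOFS =====

-- min(building, key=f)[f] equals the running min of the projection
theorem pv_min_side (f : Int × Int → Int) (p : Int × Int) (t : List (Int × Int)) :
    ((PySem.List.min? (p :: t) f).map f).getD 0 = t.foldl (fun m q => min m (f q)) (f p) := by
  obtain ⟨m, hm⟩ : ∃ m, PySem.List.min? (p :: t) f = some m := by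
    cases h : PySem.List.min? (p :: t) f with
    | none => exact absurd ((PySem.List.min?_eq_none_iff _ _).mp h) (by simp)
    | some m => exact ⟨m, rfl⟩
  have hmem := PySem.List.min?_mem hm
  have hlow := PySem.List.min?_isMin hm
  have hfold : t.foldl (fun m q => min m (f q)) (f p) = (t.map f).foldl min (f p) := by
    rw [List.foldl_map]
  have hle := PySem.List.foldl_min_le (t.map f) (f p)
  have hin := PySem.List.foldl_min_mem (t.map f) (f p)
  rw [hm, hfold]
  simp only [Option.map_some, Option.getD_some]
  apply le_antisymm
  · rcases hin with h | h
    · rw [h]; exact hlow p (by simp)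
    · obtain ⟨q, hq, hfq⟩ := List.mem_map.mp h
      rw [← hfq]; exact hlow q (by simp [hq])
  · rcases List.mem_cons.mp hmem with rfl | h
    · exact hle.1
    · exact hle.2 (f m) (List.mem_map.mpr ⟨m, h, rfl⟩)

theorem pv_max_side (f : Int × Int → Int) (p : Int × Int) (t : List (Int × Int)) :
    ((PySem.List.max? (p :: t) f).map f).getD 0 = t.foldl (fun m q => max m (f q)) (f p) := by
  obtain ⟨m, hm⟩ : ∃ m, PySem.List.max? (p :: t) f = some m := by
    cases h : PySem.List.max? (p :: t) f with
    | none => exact absurd ((PySem.List.max?_eq_none_iff _ _).mp h) (by simp)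
    | some m => exact ⟨m, rfl⟩
  have hmem := PySem.List.max?_mem hm
  have hhigh := PySem.List.max?_isMax hm
  have hfold : t.foldl (fun m q => max m (f q)) (f p) = (t.map f).foldl max (f p) := by
    rw [List.foldl_map]
  have hle := PySem.List.le_foldl_max (t.map f) (f p)
  have hin := PySem.List.foldl_max_mem (t.map f) (f p)
  rw [hm, hfold]
  simp only [Option.map_some, Option.getD_some]
  apply le_antisymm
  · rcases List.mem_cons.mp hmem with rfl | h
    · exact hle.1
    · exact hle.2 (f m) (List.mem_map.mpr ⟨m, h, rfl⟩)
  · rcases hin with h | h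
    · rw [h]; exact hhigh p (by simp)
    · obtain ⟨q, hq, hfq⟩ := List.mem_map.mp h
      rw [← hfq]; exact hhigh q (by simp [hq])

-- B's one fold over the 4-tuple state splits into four independent folds
theorem pv_fold_split (t : List (Int × Int)) (a b c d : Int) :
    t.foldl (fun s q => (min s.1 q.1, max s.2.1 q.1, min s.2.2.1 q.2, max s.2.2.2 q.2)) (a, b, c, d)
      = (t.foldl (fun m q => min m q.1) a, t.foldl (fun m q => max m q.1) b,
         t.foldl (fun m q => min m q.2) c, t.foldl (fun m q => max m q.2) d) := by
  induction t generalizing a b c d with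
  | nil => rfl
  | cons q t ih => simp [List.foldl_cons, ih]

theorem pv_box_eq (p : Int × Int) (t : List (Int × Int)) : pvBoxA (p :: t) = pvBoxB p t := by
  simp only [pvBoxA, pvBoxB, pv_fold_split,
    pv_min_side (fun x => x.1), pv_max_side (fun x => x.1),
    pv_min_side (fun x => x.2), pv_max_side (fun x => x.2)]

theorem pv_foldl_append_map (bs : List (List (Int × Int))) (acc : List (Int × Int × Int × Int)) :
    bs.foldl (fun acc b => acc ++ [pvBoxA b]) acc = acc ++ bs.map pvBoxA := by
  induction bs generalizing acc with
  | nil => simp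
  | cons b bs ih => simp [List.foldl_cons, ih]

-- ===== VERDICT (by name: the statement is the Claim_ definition above) =====
theorem get_buildings_boxes_spec : Claim_equal_get_buildings_boxes := by
  intro buildings img_size _ hpre
  unfold Spec_get_buildings_boxes get_buildings_boxes get_buildings_boxes_alt
  rw [pv_foldl_append_map, List.nil_append]
  apply List.map_congr_left
  intro b hb
  cases b with
  | nil => exact absurd rfl (hpre [] hb)
  | cons p t => exact pv_box_eq p t
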